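-- pv_equiv track=rewrite | github.com/VladislavBash/crypto3 | RSA_functions.py | get_encrypt_block
-- ===== SOURCE A (Python) =====
-- import math
--
-- def get_encrypt_block(text, n):
--     block = []
--     bit_str = ''
--     text.replace(' ', '')
--     text.replace('\n', '')
--     for sym in text:
--         bit_str += format(ord(sym), '08b') # Перевод в 8-битную строку
--     len_block = math.floor(math.log2(n))
--     if len(bit_str) % len_block != 0:
--         bit_str = ('0' * (len_block - (len(bit_str) % len_block))) + bit_str
--     # bit_str = bit_str[::-1]
--     # bl = ''
--     # for i in range(len(bit_str)):
--     #     bl += i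
--     #     if :
--     #         block.append()
--     #         bl = ''
--     for i in range(int(len(bit_str)/len_block)):
--         block.append(int(bit_str[len_block*i:len_block*(i+1)], 2))
--     block.reverse()
--     return block
-- ===== SOURCE B (Python) =====
-- def _digits(N, L, k):
--     # k least-significant L-bit digits of N, divide and conquer on bit slices
--     if k == 0:
--         return []
--     if k == 1:
--         return [N & ((1 << L) - 1)]
--     h = k // 2
--     lo = N & ((1 << (L * h)) - 1)
--     hi = N >> (L * h)
--     return _digits(lo, L, h) + _digits(hi, L, k - h)
--
-- def get_encrypt_block(text, n):
--     # pack the text into one big integer, then slice off len_block-bit digits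
--     # least significant first (the order A gets via front-padding + reverse)
--     data = text.encode('latin-1')
--     N = int.from_bytes(data, 'big')
--     len_block = n.bit_length() - 1
--     num_blocks = -(-(8 * len(data)) // len_block)
--     return _digits(N, len_block, num_blocks)
-- ===== Notes on version B (the rewrite author's own statement) =====
-- stated objective: alternative
-- what changed: B replaces A's bit-string building, front-padding, slicing and final reverse by integer arithmetic: it packs the text into one big integer with int.from_bytes and extracts the len_block-bit digits least-significant first by divide-and-conquer shift/mask splitting.
import Mathlib
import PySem

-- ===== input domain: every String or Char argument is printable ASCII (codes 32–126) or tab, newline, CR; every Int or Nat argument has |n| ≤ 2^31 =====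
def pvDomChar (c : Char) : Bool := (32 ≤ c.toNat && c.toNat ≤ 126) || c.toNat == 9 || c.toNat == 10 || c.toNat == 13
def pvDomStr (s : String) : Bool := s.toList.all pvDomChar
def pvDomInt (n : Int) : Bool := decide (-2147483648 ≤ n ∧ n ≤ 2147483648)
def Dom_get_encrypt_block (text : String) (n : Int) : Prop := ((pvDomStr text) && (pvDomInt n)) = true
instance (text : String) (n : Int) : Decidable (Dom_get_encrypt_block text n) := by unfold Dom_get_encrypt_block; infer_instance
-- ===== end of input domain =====

-- B packs the text into one big integer and extracts the len_block-bit digits least-significant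
-- first by divide-and-conquer shift/mask splitting, replacing A's bit-string building,
-- front-padding, slicing and final reverse (objective: alternative; no argument mutation).


-- ===== PORT A =====
-- format(v, 'b'): MSB-first binary digits of v
def natBin (v : Nat) : List Char :=
  if h : v < 2 then [if v = 1 then '1' else '0']
  else natBin (v / 2) ++ [if v % 2 = 1 then '1' else '0']
decreasing_by exact Nat.div_lt_self (by omega) (by omega)

-- format(v, '08b'): zero-pad on the left to width at least 8
def fmt8 (v : Nat) : List Char := List.replicate (8 - (natBin v).length) '0' ++ natBin v

-- int(s, 2) on a string of binary digits (the slices below always are)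
def parseBin (cs : List Char) : Nat :=
  cs.foldl (fun a c => 2 * a + (if c = '1' then 1 else 0)) 0

def get_encrypt_block (text : String) (n : Int) : List Int :=
  -- text.replace(' ','') / text.replace('\n','') discard their results in A: no-ops, omitted
  let bit_str := text.toList.foldl (fun acc sym => acc ++ fmt8 sym.toNat) []
  -- math.floor(math.log2(n)): exact on the admitted 2 ≤ n ≤ 2^31
  let len_block := Nat.log2 n.toNat
  let bit_str := if bit_str.length % len_block ≠ 0 then
      List.replicate (len_block - bit_str.length % len_block) '0' ++ bit_str else bit_str
  -- int(len(bit_str)/len_block): the padded length is divisible by len_block, so exact division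
  ((List.range (bit_str.length / len_block)).foldl
      (fun b i => b ++ [((parseBin ((bit_str.drop (len_block * i)).take len_block)) : Int)]) []).reverse

-- ===== PORT B =====
-- _digits(N, L, k): k least-significant L-bit digits of N, divide and conquer on bit slices
def digitsDC (L : Nat) (N : Nat) (k : Nat) : List Int :=
  if k = 0 then []
  else if k = 1 then [((N &&& (1 <<< L - 1) : Nat) : Int)]
  else
    digitsDC L (N &&& (1 <<< (L * (k / 2)) - 1)) (k / 2) ++
      digitsDC L (N >>> (L * (k / 2))) (k - k / 2)
termination_by k
decreasing_by all_goals omega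

def get_encrypt_block_alt (text : String) (n : Int) : List Int :=
  let data := text.toList.map Char.toNat  -- text.encode('latin-1'): the byte values; exact for the admitted chars (codes < 256)
  let N := data.foldl (fun a b => a * 256 + b) 0  -- int.from_bytes(data, 'big')
  let len_block := Nat.size n.natAbs - 1  -- n.bit_length() - 1
  let num_blocks := (-(PySem.Int.floordiv (-((8 * data.length : Nat) : Int)) (len_block : Int))).toNat
  digitsDC len_block N num_blocks

-- ===== PRECONDITION & SPEC =====
-- Pre_ excludes n ≤ 1, on which A raises (math.log2 ValueError for n ≤ 0, ZeroDivisionError for n = 1).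
def Pre_get_encrypt_block (text : String) (n : Int) : Prop := 2 ≤ n
instance (text : String) (n : Int) : Decidable (Pre_get_encrypt_block text n) := by
  unfold Pre_get_encrypt_block; infer_instance
def pvWitness_get_encrypt_block : String × Int := ("A", 5)

def Spec_get_encrypt_block (text : String) (n : Int) (out : List Int) : Prop := out = get_encrypt_block_alt text n
instance (text : String) (n : Int) (out : List Int) : Decidable (Spec_get_encrypt_block text n out) := by unfold Spec_get_encrypt_block; infer_instance

-- ===== CLAIM (what is proved, stated in full; the proofs are below) =====
def Claim_equal_get_encrypt_block : Prop := ∀ (text : String) (n : Int), Dom_get_encrypt_block text n → Pre_get_encrypt_block text n → Spec_get_encrypt_block text n (get_encrypt_block text n)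

-- ===== LEMMAS AND PROOFS =====

theorem parseBin_aux (cs : List Char) (a : Nat) :
    cs.foldl (fun a c => 2 * a + (if c = '1' then 1 else 0)) a
      = a * 2 ^ cs.length + parseBin cs := by
  induction cs generalizing a with
  | nil => simp [parseBin]
  | cons c cs ih =>
      simp only [List.foldl_cons, List.length_cons, parseBin]
      rw [ih, ih (2 * 0 + _)]
      ring

theorem parseBin_append (xs ys : List Char) :
    parseBin (xs ++ ys) = parseBin xs * 2 ^ ys.length + parseBin ys := by
  unfold parseBin
  rw [List.foldl_append, parseBin_aux]
  rfl

theorem parseBin_lt (cs : List Char) : parseBin cs < 2 ^ cs.length := by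
  induction cs with
  | nil => simp [parseBin]
  | cons c cs ih =>
      have : parseBin (c :: cs) = (if c = '1' then 1 else 0) * 2 ^ cs.length + parseBin cs := by
        unfold parseBin
        simp only [List.foldl_cons]
        rw [parseBin_aux]
        norm_num
        rfl
      rw [this]
      have h1 : (if c = '1' then 1 else 0) ≤ 1 := by split <;> omega
      have := Nat.pow_pos (n := cs.length) (show 0 < 2 by omega)
      calc (if c = '1' then 1 else 0) * 2 ^ cs.length + parseBin cs
          < (if c = '1' then 1 else 0) * 2 ^ cs.length + 2 ^ cs.length := by omega
        _ ≤ 1 * 2 ^ cs.length + 2 ^ cs.length := by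
            exact Nat.add_le_add_right (Nat.mul_le_mul_right _ h1) _
        _ = 2 ^ (cs.length + 1) := by ring

theorem parseBin_replicate_zero (k : Nat) : parseBin (List.replicate k '0') = 0 := by
  induction k with
  | zero => simp [parseBin]
  | succ k ih =>
      rw [List.replicate_succ, show ('0' :: List.replicate k '0') = ['0'] ++ List.replicate k '0' from rfl,
        parseBin_append, ih]
      norm_num [parseBin]
      decide

theorem parseBin_natBin (v : Nat) : parseBin (natBin v) = v := by
  induction v using Nat.strong_induction_on with
  | _ v ih =>
      rw [natBin]
      split
      · rename_i h
        interval_cases v <;> simp [parseBin]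
      · rename_i h
        rw [parseBin_append, ih (v / 2) (Nat.div_lt_self (by omega) (by omega))]
        have := Nat.div_add_mod v 2
        rcases Nat.mod_two_eq_zero_or_one v with h2 | h2 <;> simp [h2, parseBin] <;> omega

theorem natBin_length_le (v k : Nat) (hk : 1 ≤ k) (hv : v < 2 ^ k) : (natBin v).length ≤ k := by
  induction k generalizing v with
  | zero => omega
  | succ k ih =>
      rw [natBin]
      split
      · simp
      · rename_i h
        have hk1 : 1 ≤ k := by
          by_contra hc
          have : k = 0 := by omega
          subst this; simp at hv; omega
        have : v / 2 < 2 ^ k := by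
          rw [pow_succ] at hv; omega
        have := ih (v / 2) hk1 this
        simp only [List.length_append, List.length_cons, List.length_nil]
        omega

theorem fmt8_spec (v : Nat) (hv : v < 256) :
    (fmt8 v).length = 8 ∧ parseBin (fmt8 v) = v := by
  have hle : (natBin v).length ≤ 8 := natBin_length_le v 8 (by omega) (by norm_num; omega)
  constructor
  · simp [fmt8]; omega
  · rw [fmt8, parseBin_append, parseBin_replicate_zero, parseBin_natBin]
    simp

-- A's bit-string fold has length 8 per character and the big-endian base-256 value
theorem fold_text_aux : ∀ (cs : List Char), (∀ c ∈ cs, c.toNat < 256) →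
    ∀ (acc : List Char) (v : Nat), parseBin acc = v →
      (cs.foldl (fun acc sym => acc ++ fmt8 sym.toNat) acc).length = acc.length + 8 * cs.length ∧
      parseBin (cs.foldl (fun acc sym => acc ++ fmt8 sym.toNat) acc)
        = cs.foldl (fun a c => a * 256 + c.toNat) v := by
  intro cs
  induction cs with
  | nil => intro _ acc v hv; simpa using hv
  | cons c cs ih =>
      intro hcs acc v hv
      have hc : c.toNat < 256 := hcs c (by simp)
      obtain ⟨hl, hp⟩ := fmt8_spec c.toNat hc
      simp only [List.foldl_cons]
      have h1 : parseBin (acc ++ fmt8 c.toNat) = v * 256 + c.toNat := by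
        rw [parseBin_append, hl, hp, hv]
        norm_num
      have := ih (fun x hx => hcs x (by simp [hx])) (acc ++ fmt8 c.toNat) _ h1
      refine ⟨?_, this.2⟩
      rw [this.1]
      simp [hl]
      ring

-- dropping a power-of-two prefix commutes with taking a low bit field
theorem mod_pow_div_mod (N a b c : Nat) (h : b + c ≤ a) :
    N % 2 ^ a / 2 ^ b % 2 ^ c = N / 2 ^ b % 2 ^ c := by
  obtain ⟨q, r, rfl, hr⟩ : ∃ q r, N = 2 ^ a * q + r ∧ r < 2 ^ a :=
    ⟨N / 2 ^ a, N % 2 ^ a, (Nat.div_add_mod N (2 ^ a)).symm,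
      Nat.mod_lt _ (by positivity)⟩
  have ha : (2 : Nat) ^ a = 2 ^ b * 2 ^ (a - b) := by
    rw [← pow_add]; congr 1; omega
  have hab : (2 : Nat) ^ (a - b) = 2 ^ c * 2 ^ (a - b - c) := by
    rw [← pow_add]; congr 1; omega
  rw [Nat.mul_add_mod, Nat.mod_eq_of_lt hr, ha, Nat.mul_assoc,
    Nat.mul_add_div (show 0 < (2 : Nat) ^ b by positivity), hab, Nat.mul_assoc,
    Nat.mul_add_mod]

-- the divide-and-conquer digit extraction is the list of L-bit digits
theorem digitsDC_eq (L : Nat) : ∀ (k N : Nat),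
    digitsDC L N k = (List.range k).map (fun j => ((N / 2 ^ (L * j) % 2 ^ L : Nat) : Int)) := by
  intro k
  induction k using Nat.strong_induction_on with
  | _ k ih =>
      intro N
      rw [digitsDC]
      by_cases h0 : k = 0
      · simp [h0]
      · rw [if_neg h0]
        by_cases h1 : k = 1
        · subst h1
          simp [Nat.one_shiftLeft, Nat.and_two_pow_sub_one_eq_mod]
        · rw [if_neg h1]
          have hh : k / 2 < k := by omega
          have hh2 : k - k / 2 < k := by omega
          rw [ih _ hh, ih _ hh2]
          rw [show k = k / 2 + (k - k / 2) by omega, List.range_add, List.map_append,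
            List.map_map]
          rw [show k / 2 + (k - k / 2) = k by omega]
          congr 1
          · apply List.map_congr_left
            intro j hj
            rw [List.mem_range] at hj
            rw [Nat.one_shiftLeft, Nat.and_two_pow_sub_one_eq_mod,
              mod_pow_div_mod _ _ _ _ (by
                have : j + 1 ≤ k / 2 := hj
                calc L * j + L = L * (j + 1) := by ring
                  _ ≤ L * (k / 2) := Nat.mul_le_mul_left L this)]
          · apply List.map_congr_left
            intro j hj
            simp only [Function.comp]
            rw [Nat.shiftRight_eq_div_pow, Nat.div_div_eq_div_mul, ← pow_add,
              ← Nat.mul_add]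

-- A's append loop is a map
theorem foldl_append_map {α β : Type} (g : α → β) (l : List α) (acc : List β) :
    l.foldl (fun b i => b ++ [g i]) acc = acc ++ l.map g := by
  induction l generalizing acc with
  | nil => simp
  | cons x l ih => simp [ih]

-- the central slicing lemma
theorem slice_digit (s : List Char) (L k i : Nat) (hL : 0 < L)
    (hlen : s.length = L * k) (hi : i < k) :
    parseBin ((s.drop (L * i)).take L) = parseBin s / 2 ^ (L * (k - 1 - i)) % 2 ^ L := by
  set x := s.take (L * i) with hx
  set y := (s.drop (L * i)).take L with hy
  set z := s.drop (L * i + L) with hz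
  have hiL : L * i + L ≤ L * k := by
    have h1 : i + 1 ≤ k := hi
    calc L * i + L = L * (i + 1) := by ring
      _ ≤ L * k := Nat.mul_le_mul_left L h1
  have hs : s = x ++ (y ++ z) := by
    rw [hx, hy, hz]
    conv_lhs => rw [← List.take_append_drop (L * i) s]
    congr 1
    conv_lhs => rw [← List.take_append_drop L (s.drop (L * i))]
    congr 1
    rw [List.drop_drop]
  have hylen : y.length = L := by
    rw [hy, List.length_take, List.length_drop, hlen]
    omega
  have hzlen : z.length = L * (k - 1 - i) := by
    rw [hz, List.length_drop, hlen]
    have h2 : L * k - (L * i + L) = L * (k - 1 - i) := by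
      rw [Nat.mul_sub, Nat.mul_sub, Nat.mul_one]
      omega
    omega
  have hyb : parseBin y < 2 ^ L := by rw [← hylen]; exact parseBin_lt y
  have hzb : parseBin z < 2 ^ (L * (k - 1 - i)) := hzlen ▸ parseBin_lt z
  rw [hs, parseBin_append, parseBin_append, List.length_append, hylen, hzlen]
  have hA : parseBin x * 2 ^ (L + L * (k - 1 - i)) + (parseBin y * 2 ^ (L * (k - 1 - i)) + parseBin z)
      = 2 ^ (L * (k - 1 - i)) * (parseBin x * 2 ^ L + parseBin y) + parseBin z := by
    rw [pow_add]; ring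
  rw [hA, Nat.mul_add_div (by positivity), Nat.div_eq_of_lt hzb, Nat.add_zero,
    Nat.mul_comm (parseBin x) (2 ^ L), Nat.mul_add_mod, Nat.mod_eq_of_lt hyb]

theorem reverse_map_range {β : Type} (k : Nat) (g : Nat → β) :
    ((List.range k).map g).reverse = (List.range k).map (fun j => g (k - 1 - j)) := by
  apply List.ext_getElem
  · simp
  · intro j h1 h2
    simp only [List.length_reverse, List.length_map, List.length_range] at h1 h2
    rw [List.getElem_reverse]
    simp only [List.getElem_map, List.getElem_range, List.length_map, List.length_range]

theorem log2_eq_size_sub_one (v : Nat) (hv : 1 ≤ v) : Nat.log2 v = Nat.size v - 1 := by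
  rw [Nat.log2_eq_log_two]
  have h1 : 2 ^ (Nat.size v - 1) ≤ v := by
    have := Nat.lt_size.mp (show Nat.size v - 1 < Nat.size v by
      have := Nat.size_pos.mpr (by omega : 0 < v); omega)
    exact this
  have h2 : v < 2 ^ (Nat.size v - 1 + 1) := by
    have h3 : v < 2 ^ Nat.size v := Nat.size_le.mp le_rfl
    have : Nat.size v - 1 + 1 = Nat.size v := by
      have := Nat.size_pos.mpr (by omega : 0 < v); omega
    rwa [this]
  exact Nat.log_eq_of_pow_le_of_lt_pow h1 h2

theorem ceil_div_eq (T L : Nat) (hL : 0 < L) :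
    (-(PySem.Int.floordiv (-(T : Int)) (L : Int))).toNat = (T + L - 1) / L := by
  rw [PySem.Int.floordiv_eq_ediv_of_pos (by exact_mod_cast hL)]
  set q := (T + L - 1) / L with hq
  have h1 : q * L ≤ T + L - 1 := Nat.div_mul_le_self _ _
  have h2 : T + L - 1 < (q + 1) * L := (Nat.div_lt_iff_lt_mul hL).mp (Nat.lt_succ_self q)
  have hexp : (q + 1) * L = q * L + L := by ring
  have hT1 : T ≤ q * L := by omega
  have hT2 : q * L < T + L := by omega
  have hcast : ((-T : Int)) = ((q * L - T : Nat) : Int) + (-(q : Int)) * L := by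
    have h3 : ((q * L - T : Nat) : Int) = (q : Int) * L - T := by
      push_cast [hT1]
      ring
    rw [h3]; ring
  have hdiv : ((-T : Int)) / (L : Int) = -(q : Int) := by
    rw [hcast, Int.add_mul_ediv_right _ _ (by exact_mod_cast hL.ne' : (L : Int) ≠ 0),
      Int.ediv_eq_zero_of_lt (by positivity) (by exact_mod_cast (by omega : q * L - T < L))]
    ring
  rw [hdiv]
  simp

theorem ceil_div_char (T L : Nat) (hL : 0 < L) :
    (T + L - 1) / L = T / L + (if T % L = 0 then 0 else 1) := by
  have hT' : T = L * (T / L) + T % L := (Nat.div_add_mod T L).symm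
  have hrlt : T % L < L := Nat.mod_lt _ hL
  by_cases hr : T % L = 0
  · rw [if_pos hr, Nat.add_zero]
    have h1 : T + L - 1 = L * (T / L) + (L - 1) := by
      conv_lhs => rw [hT', hr]
      rw [Nat.add_zero, Nat.add_sub_assoc (by omega)]
    rw [h1, Nat.mul_add_div hL]
    have h2 : (L - 1) / L = 0 := Nat.div_eq_of_lt (by omega)
    rw [h2, Nat.add_zero]
  · rw [if_neg hr]
    have h1 : T + L - 1 = L * (T / L) + (T % L + L - 1) := by
      conv_lhs => rw [hT']
      rw [Nat.add_assoc, Nat.add_sub_assoc (by omega)]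
    rw [h1, Nat.mul_add_div hL]
    have h2 : (T % L + L - 1) / L = 1 := Nat.div_eq_of_lt_le (by omega) (by omega)
    rw [h2]

-- the two bodies agree for any block width L > 0 and 8-bit characters
theorem main_core (cs : List Char) (L : Nat) (hL : 0 < L)
    (hc : ∀ c ∈ cs, c.toNat < 256) :
    (let bit_str := cs.foldl (fun acc sym => acc ++ fmt8 sym.toNat) []
     let bit_str2 := if bit_str.length % L ≠ 0 then
        List.replicate (L - bit_str.length % L) '0' ++ bit_str else bit_str
     ((List.range (bit_str2.length / L)).foldl
        (fun b i => b ++ [((parseBin ((bit_str2.drop (L * i)).take L)) : Int)]) []).reverse)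
    =
    (let data := cs.map Char.toNat
     let N := data.foldl (fun a b => a * 256 + b) 0
     let num_blocks := (-(PySem.Int.floordiv (-((8 * data.length : Nat) : Int)) (L : Int))).toNat
     digitsDC L N num_blocks) := by
  dsimp only
  rw [List.foldl_map, List.length_map]
  obtain ⟨hbslen, hbsval⟩ := fold_text_aux cs hc [] 0 (by simp [parseBin])
  simp only [List.length_nil, Nat.zero_add] at hbslen
  set bs := cs.foldl (fun acc sym => acc ++ fmt8 sym.toNat) [] with hbs
  set N := cs.foldl (fun a c => a * 256 + c.toNat) 0 with hNd
  set T := 8 * cs.length with hT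
  set k := (T + L - 1) / L with hk
  have hT' : T = L * (T / L) + T % L := (Nat.div_add_mod T L).symm
  have hrlt : T % L < L := Nat.mod_lt _ hL
  have hkval : k = T / L + (if T % L = 0 then 0 else 1) := by
    rw [hk, ceil_div_char T L hL]
  set bit_str2 := if bs.length % L ≠ 0 then
      List.replicate (L - bs.length % L) '0' ++ bs else bs with hbit2
  have hplen : bit_str2.length = L * k := by
    rw [hbit2, hbslen]
    by_cases hr : T % L = 0
    · rw [if_neg (by simp [hr]), hkval, if_pos hr, Nat.add_zero, hbslen]
      exact (Nat.mul_div_cancel' (Nat.dvd_of_mod_eq_zero hr)).symm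
    · rw [if_pos (by simp [hr]), hkval, if_neg hr, List.length_append,
        List.length_replicate, hbslen, Nat.mul_add, Nat.mul_one]
      generalize L * (T / L) = P at hT' ⊢
      omega
  have hpval : parseBin bit_str2 = N := by
    rw [hbit2, hbslen]
    by_cases hr : T % L = 0
    · rw [if_neg (by simp [hr]), hbsval]
    · rw [if_pos (by simp [hr]), parseBin_append, parseBin_replicate_zero, Nat.zero_mul,
        Nat.zero_add, hbsval]
  have hkdiv : bit_str2.length / L = k := by
    rw [hplen, Nat.mul_div_cancel_left _ hL]
  rw [hkdiv, foldl_append_map]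
  simp only [List.nil_append]
  rw [reverse_map_range, ceil_div_eq T L hL, ← hk, digitsDC_eq]
  apply List.map_congr_left
  intro j hj
  rw [List.mem_range] at hj
  have hi : k - 1 - j < k := by omega
  rw [slice_digit bit_str2 L k (k - 1 - j) hL hplen hi, hpval]
  have he : k - 1 - (k - 1 - j) = j := by omega
  rw [he]

-- ===== VERDICT (by name: the statement is the Claim_ definition above) =====
theorem get_encrypt_block_spec : Claim_equal_get_encrypt_block := by
  intro text n hdom hpre
  unfold Spec_get_encrypt_block
  have hn2 : (2 : Int) ≤ n := hpre
  have hc : ∀ c ∈ text.toList, c.toNat < 256 := by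
    unfold Dom_get_encrypt_block pvDomStr pvDomChar at hdom
    simp only [Bool.and_eq_true, List.all_eq_true] at hdom
    intro c hcm
    have h := hdom.1 c hcm
    simp only [Bool.or_eq_true, Bool.and_eq_true, decide_eq_true_eq, beq_iff_eq] at h
    omega
  have hLeq : Nat.size n.natAbs - 1 = Nat.log2 n.toNat := by
    have h1 : n.toNat = n.natAbs := by omega
    rw [← h1, log2_eq_size_sub_one _ (by omega)]
  have hLpos : 0 < Nat.log2 n.toNat := by
    have := (Nat.le_log2 (n := n.toNat) (by omega)).mpr (by rw [pow_one]; omega)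
    omega
  simp only [get_encrypt_block, get_encrypt_block_alt, hLeq]
  exact main_core text.toList (Nat.log2 n.toNat) hLpos hc
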